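-- pv_equiv track=rewrite | github.com/benquick123/code-profiling | code/batch-1/vse-naloge-brez-testov/DN7-M-159.py | brez_sosedov
-- ===== SOURCE A (Python) =====
-- def vsa_polja(s, v):
--     """
--     Generiraj vse koordinate (x, y) za polje s podano širino in višino
--     Args:
--         s (int): širina
--         v (int): višina
--
--     Returns:
--         generator parov polj
--     """
--     return ((x, y) for x in range(s) for y in range(v))
--
-- def sosedov(x, y, mine):
--     """
--     Vrni število sosedov polja s koordinatami `(x, y)` na katerih je mina.
--     Polje samo ne šteje.
--
--     Args:
--         x (int): koordinata x
--         y (int): koordinata y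
--         mine (set of tuple of int): koordinate min
--
--     Returns:
--         int: število sosedov
--     """
--
--     return sum([1 for x1 in range(x - 1, x + 2) for y1 in range(y - 1, y + 2) if (x1, y1) in mine and not (x1 == x and y1 == y)])
--
-- def brez_sosedov(mine, s, v):
--     """
--     Vrni množico koordinat polj brez min na sosednjih poljih. Polje samo lahko
--     vsebuje mino.
--
--     Args:
--         mine (set of tuple of int): koordinate min
--         s (int): širina polja
--         v (int): višina polja
--
--     Returns:
--         set of tuple: polja brez min na sosednjih poljih
--     """
--     """
--     mnozica = set()
--     for x, y in vsa_polja(s, v):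
--         if not sosedov(x, y, mine):
--             mnozica.add((x, y))
--     return mnozica
--     """
--     return ({(x, y) for x, y in vsa_polja(s, v) if not sosedov(x, y, mine)})
-- ===== SOURCE B (Python) =====
-- def mark_neighbors(bad, m):
--     mx, my = m
--     for dx in (-1, 0, 1):
--         for dy in (-1, 0, 1):
--             if dx or dy:
--                 bad.add((mx + dx, my + dy))
--     return bad
--
-- def brez_sosedov(mine, s, v):
--     bad = set()
--     for m in mine:
--         bad = mark_neighbors(bad, m)
--     return {(x, y) for x in range(s) for y in range(v) if (x, y) not in bad}
-- ===== Notes on version B (the rewrite author's own statement) =====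
-- stated objective: faster
-- what changed: Instead of rescanning the 3x3 neighborhood of every grid cell against the mine collection, B marks the 8 neighbors of each mine once into a 'bad' set and then collects grid cells not in it, replacing the per-cell 9-point scan with one membership test; intended as faster (O(|mine|+s*v) vs O(s*v*|mine|)); a timing run measured B 5-12x faster at the largest sizes both finished but could not confirm at the top size, where both timed out.
import Mathlib
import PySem

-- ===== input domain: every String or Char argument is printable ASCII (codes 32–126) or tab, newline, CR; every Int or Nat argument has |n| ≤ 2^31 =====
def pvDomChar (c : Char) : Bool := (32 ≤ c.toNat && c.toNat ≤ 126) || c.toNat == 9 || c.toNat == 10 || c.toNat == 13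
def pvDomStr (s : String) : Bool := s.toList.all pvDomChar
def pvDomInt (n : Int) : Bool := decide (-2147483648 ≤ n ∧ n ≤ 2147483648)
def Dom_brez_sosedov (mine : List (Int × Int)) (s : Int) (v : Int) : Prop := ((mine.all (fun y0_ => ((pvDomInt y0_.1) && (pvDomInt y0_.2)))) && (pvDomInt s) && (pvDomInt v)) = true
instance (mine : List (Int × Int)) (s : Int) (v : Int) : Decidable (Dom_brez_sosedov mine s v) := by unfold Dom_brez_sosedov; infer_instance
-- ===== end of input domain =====

-- B marks the 8 neighbors of each mine once into a 'bad' set, then collects the grid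
-- cells not in it, instead of A's per-cell 3x3 rescan of the mine collection.

-- ===== PORT A =====
-- vsa_polja(s, v): the generator ((x, y) for x in range(s) for y in range(v))
def pyVsaPolja (s v : Int) : List (Int × Int) :=
  (PySem.List.pyRange 0 s 1).flatMap (fun x =>
    (PySem.List.pyRange 0 v 1).map (fun y => (x, y)))

-- sosedov(x, y, mine): sum([1 for x1 in range(x-1,x+2) for y1 in range(y-1,y+2)
--                          if (x1,y1) in mine and not (x1 == x and y1 == y)])
def pySosedov (x y : Int) (mine : List (Int × Int)) : Int :=
  ((PySem.List.pyRange (x - 1) (x + 2) 1).flatMap (fun x1 =>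
    (PySem.List.pyRange (y - 1) (y + 2) 1).flatMap (fun y1 =>
      if mine.contains (x1, y1) && !(x1 == x && y1 == y) then [(1 : Int)] else []))).sum

-- {(x, y) for x, y in vsa_polja(s, v) if not sosedov(x, y, mine)}
def brez_sosedov (mine : List (Int × Int)) (s : Int) (v : Int) : List (Int × Int) :=
  PySem.Set.ofList ((pyVsaPolja s v).filter (fun p => pySosedov p.1 p.2 mine == 0))

-- ===== PORT B =====
-- mark_neighbors(bad, m): add the 8 coordinates surrounding mine m to bad
def markMine (bad : PySem.Set (Int × Int)) (m : Int × Int) : PySem.Set (Int × Int) :=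
  [(-1 : Int), 0, 1].foldl (fun bad dx =>
    [(-1 : Int), 0, 1].foldl (fun bad dy =>
      if dx ≠ 0 ∨ dy ≠ 0 then PySem.Set.add bad (m.1 + dx, m.2 + dy) else bad)
    bad) bad

-- the 'bad' set: for each mine, mark its 8 surrounding coordinates
def badNeighbors (mine : List (Int × Int)) : PySem.Set (Int × Int) :=
  mine.foldl markMine PySem.Set.empty

-- {(x, y) for x in range(s) for y in range(v) if (x, y) not in bad}
def brez_sosedov_alt (mine : List (Int × Int)) (s : Int) (v : Int) : List (Int × Int) :=
  PySem.Set.ofList ((PySem.List.pyRange 0 s 1).flatMap (fun x =>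
    (PySem.List.pyRange 0 v 1).filterMap (fun y =>
      if (badNeighbors mine).contains (x, y) then none else some (x, y))))

-- ===== PRECONDITION & SPEC =====
def Spec_brez_sosedov (mine : List (Int × Int)) (s : Int) (v : Int) (out : List (Int × Int)) : Prop := out = brez_sosedov_alt mine s v
instance (mine : List (Int × Int)) (s : Int) (v : Int) (out : List (Int × Int)) : Decidable (Spec_brez_sosedov mine s v out) := by unfold Spec_brez_sosedov; infer_instance

-- ===== CLAIM (what is proved, stated in full; the proofs are below) =====
def Claim_equal_brez_sosedov : Prop := ∀ (mine : List (Int × Int)) (s : Int) (v : Int), Dom_brez_sosedov mine s v → Spec_brez_sosedov mine s v (brez_sosedov mine s v)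

-- ===== LEMMAS AND PROOFS =====

-- m is one of the 8 neighbors of p (not p itself)
def Near (m p : Int × Int) : Prop :=
  m ≠ p ∧ p.1 - 1 ≤ m.1 ∧ m.1 ≤ p.1 + 1 ∧ p.2 - 1 ≤ m.2 ∧ m.2 ≤ p.2 + 1

lemma range3 (a : Int) : PySem.List.pyRange (a - 1) (a + 2) 1 = [a - 1, a, a + 1] := by
  rw [PySem.List.pyRange_one_cons (by omega)]
  rw [show a - 1 + 1 = a by ring]
  rw [PySem.List.pyRange_one_cons (by omega)]
  rw [PySem.List.pyRange_one_cons (by omega)]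
  rw [PySem.List.pyRange_one_eq_nil (by omega)]

lemma sum9 : ∀ (c1 c2 c3 c4 c5 c6 c7 c8 c9 : Bool),
    (if c1 = true then (1 : Int) else 0) + ((if c2 = true then (1 : Int) else 0) + (if c3 = true then (1 : Int) else 0)) +
      ((if c4 = true then (1 : Int) else 0) + ((if c5 = true then (1 : Int) else 0) + (if c6 = true then (1 : Int) else 0)) +
        ((if c7 = true then (1 : Int) else 0) + ((if c8 = true then (1 : Int) else 0) + (if c9 = true then (1 : Int) else 0)))) = 0
    ↔ (c1 = false ∧ c2 = false ∧ c3 = false ∧ c4 = false ∧ c5 = false ∧ c6 = false ∧ c7 = false ∧ c8 = false ∧ c9 = false) := by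
  intro c1 c2 c3 c4 c5 c6 c7 c8 c9
  cases c1 <;> cases c2 <;> cases c3 <;> cases c4 <;> cases c5 <;>
    cases c6 <;> cases c7 <;> cases c8 <;> cases c9 <;> decide

lemma sosedov_zero_iff (x y : Int) (mine : List (Int × Int)) :
    pySosedov x y mine = 0 ↔ ∀ m ∈ mine, ¬ Near m (x, y) := by
  unfold pySosedov
  rw [range3 x, range3 y]
  have hsum : ∀ (c : Bool), (if c = true then [(1 : Int)] else []).sum = (if c = true then 1 else 0) := by
    intro c; cases c <;> simp
  simp only [List.flatMap_cons, List.flatMap_nil, List.sum_append, List.append_nil, hsum]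
  have hside : ∀ a b : Int, (a = x → b ≠ y) →
      (mine.contains (a, b) && !(a == x && b == y)) = mine.contains (a, b) := by
    intro a b hab
    by_cases ha : a = x
    · have hb : (b == y) = false := beq_eq_false_iff_ne.mpr (hab ha)
      simp [hb]
    · have ha' : (a == x) = false := beq_eq_false_iff_ne.mpr ha
      simp [ha']
  have hcenter : (mine.contains (x, y) && !(x == x && y == y)) = false := by simp
  rw [hside (x-1) (y-1) (by intro h; omega), hside (x-1) y (by intro h; omega),
      hside (x-1) (y+1) (by intro h; omega), hside x (y-1) (by intro _; omega),
      hcenter, hside x (y+1) (by intro _; omega),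
      hside (x+1) (y-1) (by intro h; omega), hside (x+1) y (by intro h; omega),
      hside (x+1) (y+1) (by intro h; omega)]
  rw [sum9]
  constructor
  · rintro ⟨h1, h2, h3, h4, _, h6, h7, h8, h9⟩ m hm hnear
    obtain ⟨hne, hb1, hb2, hb3, hb4⟩ := hnear
    obtain ⟨mx, my⟩ := m
    simp only [ne_eq, Prod.mk.injEq, not_and] at hne
    simp only at hb1 hb2 hb3 hb4
    have hc : mine.contains (mx, my) = true := List.contains_iff_mem.mpr hm
    have hx : mx = x - 1 ∨ mx = x ∨ mx = x + 1 := by omega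
    have hy : my = y - 1 ∨ my = y ∨ my = y + 1 := by omega
    rcases hx with hx | hx | hx <;> rcases hy with hy | hy | hy <;> subst hx <;> subst hy <;>
      simp_all
  · intro h
    have hnot : ∀ a b : Int, (a = x → b ≠ y) → x - 1 ≤ a → a ≤ x + 1 → y - 1 ≤ b → b ≤ y + 1 →
        mine.contains (a, b) = false := by
      intro a b hab hb1 hb2 hb3 hb4
      by_contra hc
      simp only [Bool.not_eq_false] at hc
      have hmem : (a, b) ∈ mine := List.contains_iff_mem.mp hc
      refine h _ hmem ⟨?_, by omega, by omega, by omega, by omega⟩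
      simp only [ne_eq, Prod.mk.injEq, not_and]
      exact hab
    refine ⟨?_, ?_, ?_, ?_, rfl, ?_, ?_, ?_, ?_⟩ <;>
      apply hnot <;> (try intro h') <;> omega

lemma mem_markMine (m : Int × Int) (s : PySem.Set (Int × Int)) (p : Int × Int) :
    p ∈ markMine s m ↔ p ∈ s ∨ Near m p := by
  unfold markMine
  obtain ⟨mx, my⟩ := m
  obtain ⟨px, py⟩ := p
  simp only [List.foldl_cons, List.foldl_nil]
  norm_num [PySem.Set.mem_add, Prod.ext_iff, Near]
  by_cases hs : (px, py) ∈ s <;> (simp [hs]; try omega)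

lemma mem_badNeighbors (mine : List (Int × Int)) (p : Int × Int) :
    p ∈ badNeighbors mine ↔ ∃ m ∈ mine, Near m p := by
  unfold badNeighbors
  suffices h : ∀ acc : PySem.Set (Int × Int),
      p ∈ mine.foldl markMine acc ↔ p ∈ acc ∨ ∃ m ∈ mine, Near m p by
    rw [h]
    simp [PySem.Set.empty]
  induction mine with
  | nil => simp
  | cons m rest ih =>
    intro acc
    simp only [List.foldl_cons, ih, mem_markMine]
    constructor
    · rintro ((h | h) | ⟨m', hm', hn⟩)
      · exact Or.inl h
      · exact Or.inr ⟨m, List.mem_cons_self, h⟩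
      · exact Or.inr ⟨m', List.mem_cons_of_mem _ hm', hn⟩
    · rintro (h | ⟨m', hm', hn⟩)
      · exact Or.inl (Or.inl h)
      · rcases List.mem_cons.mp hm' with rfl | hm'
        · exact Or.inl (Or.inr hn)
        · exact Or.inr ⟨m', hm', hn⟩

lemma pred_eq (mine : List (Int × Int)) (p : Int × Int) :
    (pySosedov p.1 p.2 mine == 0) = !(badNeighbors mine).contains p := by
  have h1 := sosedov_zero_iff p.1 p.2 mine
  have h2 := mem_badNeighbors mine p
  by_cases hc : ∃ m ∈ mine, Near m p
  · have hne : pySosedov p.1 p.2 mine ≠ 0 := by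
      intro h0
      rcases hc with ⟨m, hm, hn⟩
      exact (h1.mp h0) m hm hn
    have hmem : p ∈ badNeighbors mine := h2.mpr hc
    simp [hne, hmem]
  · have h0 : pySosedov p.1 p.2 mine = 0 := h1.mpr (fun m hm hn => hc ⟨m, hm, hn⟩)
    have hmem : p ∉ badNeighbors mine := fun hm => hc (h2.mp hm)
    simp [h0, hmem]

lemma filterMap_guard (l : List Int) (f : Int → Int × Int) (c : Int × Int → Bool) :
    l.filterMap (fun y => if c (f y) then none else some (f y))
      = (l.map f).filter (fun p => !c p) := by
  induction l with
  | nil => rfl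
  | cons a t ih =>
    simp only [List.filterMap_cons, List.map_cons, List.filter_cons]
    cases h : c (f a) <;> simp [ih]

-- ===== VERDICT (by name: the statement is the Claim_ definition above) =====
theorem brez_sosedov_spec : Claim_equal_brez_sosedov := by
  intro mine s v _
  unfold Spec_brez_sosedov brez_sosedov brez_sosedov_alt pyVsaPolja
  congr 1
  rw [List.filter_flatMap]
  refine (List.flatMap_congr fun x _ => ?_).symm
  rw [filterMap_guard (c := fun p => (badNeighbors mine).contains p) (f := fun y => (x, y))]
  exact List.filter_congr fun p _ => (pred_eq mine p).symm
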